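-- pv_equiv track=rewrite | github.com/AllanKamimura/DSA | leetcode/queue/0950_reveal-cards-in-increasing-order/main.py | deckRevealedIncreasing
-- ===== SOURCE A (Python) =====
-- from collections import deque
-- from typing import List
--
-- def deckRevealedIncreasing(deck: List[int]) -> List[int]:
--     deck.sort()
--
--     queue = deque([deck.pop()])
--
--     while deck:
--         card = deck.pop()
--         prev_card = queue.pop()
--         queue.appendleft(prev_card)
--         queue.appendleft(card)
--
--     return list(queue)
-- ===== SOURCE B (Python) =====
-- from collections import deque
--
--
-- def deckRevealedIncreasing(deck):
--     n = len(deck)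
--     res = [0] * n
--     q = deque(range(n))
--     for card in sorted(deck):
--         res[q.popleft()] = card
--         if q:
--             q.append(q.popleft())
--     return res
-- ===== Notes on version B (the rewrite author's own statement) =====
-- stated objective: idiomatic
-- what changed: Instead of A's backwards construction (popping the sorted deck from the largest card and rebuilding the final deck by rotate-right/appendleft on a deque of values), B runs the forward reveal simulation: an index deque of positions is rotated exactly as the reveal process would, and each ascending card is written directly into its final slot of a preallocated result array.
import Mathlib
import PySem

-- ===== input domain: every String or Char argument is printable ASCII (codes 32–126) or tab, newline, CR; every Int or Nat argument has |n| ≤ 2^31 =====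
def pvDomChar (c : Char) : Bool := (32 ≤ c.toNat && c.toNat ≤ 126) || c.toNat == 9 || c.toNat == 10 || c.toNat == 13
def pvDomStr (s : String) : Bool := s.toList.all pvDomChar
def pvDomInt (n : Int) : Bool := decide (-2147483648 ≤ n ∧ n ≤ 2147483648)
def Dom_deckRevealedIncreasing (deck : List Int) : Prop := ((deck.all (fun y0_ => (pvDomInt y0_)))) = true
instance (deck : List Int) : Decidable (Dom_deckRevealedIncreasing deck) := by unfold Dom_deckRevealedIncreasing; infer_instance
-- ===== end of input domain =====

-- B replaces A's backwards deque-of-values construction by the forward reveal simulation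
-- with an index queue and a preallocated result array (same asymptotics; claim is about the
-- RETURN value only: Python A empties its argument in place, B leaves it unchanged).

-- ===== PORT A =====
-- card :: (queue.pop() reinserted at the left) : queue.pop(); appendleft(prev); appendleft(card).
-- The [] branch is unreachable in A (the queue is seeded nonempty); it mirrors no Python code path.
def pvRotR (q : List Int) : List Int :=
  match q with
  | [] => []
  | y :: q' => (y :: q').getLast (by simp) :: (y :: q').dropLast

-- while deck: card = deck.pop(); queue = card :: rotR queue  (pop takes the LAST element)
def pvALoop : List Int → List Int → List Int
  | [], q => q
  | x :: ds, q => pvALoop ((x :: ds).dropLast) ((x :: ds).getLast (by simp) :: pvRotR q)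
  termination_by d _ => d.length
  decreasing_by simp [List.length_dropLast]

def deckRevealedIncreasing (deck : List Int) : List Int :=
  match (PySem.List.sorted deck (fun x => x) false) with
  | [] => []   -- Python raises IndexError here (pop from empty list); excluded by Pre_
  | x :: ds => pvALoop ((x :: ds).dropLast) [(x :: ds).getLast (by simp)]

-- ===== PORT B =====
-- q.popleft() after the leading popleft, re-appended at the right
def pvRot (q : List Nat) : List Nat :=
  match q with
  | [] => []
  | j :: q' => q' ++ [j]

-- for card in sorted(deck): res[q.popleft()] = card; if q: q.append(q.popleft())
-- (the cards/[] branch is unreachable: the index queue has exactly one slot per card)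
def pvBLoop : List Int → List Nat → List Int → List Int
  | [], _, res => res
  | _ :: _, [], res => res
  | c :: cs, i :: q, res => pvBLoop cs (pvRot q) (res.set i c)

def deckRevealedIncreasing_alt (deck : List Int) : List Int :=
  pvBLoop ((PySem.List.sorted deck (fun x => x) false)) (List.range deck.length) (List.replicate deck.length 0)

-- ===== PRECONDITION & SPEC =====
-- Pre_ excludes only the empty deck, on which A raises IndexError (pop from empty list).
def Pre_deckRevealedIncreasing (deck : List Int) : Prop := deck ≠ []
instance (deck : List Int) : Decidable (Pre_deckRevealedIncreasing deck) := by unfold Pre_deckRevealedIncreasing; infer_instance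
def pvWitness_deckRevealedIncreasing : List Int := [17, 13, 11, 2, 3, 5, 7]

def Spec_deckRevealedIncreasing (deck : List Int) (out : List Int) : Prop := out = deckRevealedIncreasing_alt deck
instance (deck : List Int) (out : List Int) : Decidable (Spec_deckRevealedIncreasing deck out) := by unfold Spec_deckRevealedIncreasing; infer_instance

-- ===== CLAIM (what is proved, stated in full; the proofs are below) =====
def Claim_equal_deckRevealedIncreasing : Prop := ∀ (deck : List Int), Dom_deckRevealedIncreasing deck → Pre_deckRevealedIncreasing deck → Spec_deckRevealedIncreasing deck (deckRevealedIncreasing deck)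

-- ===== LEMMAS AND PROOFS =====

-- the common recursive shape both algorithms compute
def pvF : List Int → List Int
  | [] => []
  | x :: t => x :: pvRotR (pvF t)

theorem pvALoop_snoc (d : List Int) (c : Int) (q : List Int) :
    pvALoop (d ++ [c]) q = pvALoop d (c :: pvRotR q) := by
  cases d with
  | nil => simp [pvALoop]
  | cons y d' =>
    have h1 : (y :: (d' ++ [c])).dropLast = y :: d' := by
      rw [← List.cons_append, List.dropLast_concat]
    have h2 : ∀ h, (y :: (d' ++ [c])).getLast h = c := fun h => by
      rw [List.getLast_cons (by simp)]; exact List.getLast_append _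
    rw [List.cons_append, pvALoop.eq_2, h1, h2]

theorem pvALoop_cons (x : Int) (d : List Int) (q : List Int) :
    pvALoop (x :: d) q = x :: pvRotR (pvALoop d q) := by
  induction d using List.reverseRecOn generalizing q with
  | nil => simp [pvALoop]
  | append_singleton d c IH =>
    rw [show x :: (d ++ [c]) = (x :: d) ++ [c] by simp, pvALoop_snoc, IH, pvALoop_snoc]

theorem pvALoop_eq_pvF (d : List Int) (c : Int) :
    pvALoop d [c] = pvF (d ++ [c]) := by
  induction d generalizing c with
  | nil => simp [pvALoop, pvF, pvRotR]
  | cons x d' IH => rw [pvALoop_cons, IH]; rfl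

-- position order of the index queue
def pvP : List Nat → List Nat
  | [] => []
  | i :: q => i :: pvP (pvRot q)
  termination_by q => q.length
  decreasing_by cases q <;> simp [pvRot]

theorem pvBLoop_eq_foldl (cards : List Int) (q : List Nat) (res : List Int) :
    pvBLoop cards q res = ((pvP q).zip cards).foldl (fun r ic => r.set ic.1 ic.2) res := by
  induction cards generalizing q res with
  | nil => simp [pvBLoop]
  | cons c cs IH =>
    cases q with
    | nil => simp [pvBLoop, pvP]
    | cons i q' => rw [pvBLoop, pvP]; simp only [List.zip_cons_cons, List.foldl_cons]; exact IH _ _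

theorem pvRot_map (g : Nat → Nat) (q : List Nat) : pvRot (q.map g) = (pvRot q).map g := by
  cases q <;> simp [pvRot]

theorem pvRot_perm (q : List Nat) : (pvRot q).Perm q := by
  cases q with
  | nil => simp [pvRot]
  | cons j q' => simp only [pvRot]; exact List.perm_append_singleton j q'

theorem pvP_map (g : Nat → Nat) (q : List Nat) : pvP (q.map g) = (pvP q).map g := by
  induction q using pvP.induct with
  | case1 => simp [pvP]
  | case2 i q IH =>
    simp only [List.map_cons, pvP, pvRot_map, IH]

theorem pvP_perm (q : List Nat) : (pvP q).Perm q := by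
  induction q using pvP.induct with
  | case1 => simp [pvP]
  | case2 i q IH =>
    rw [pvP]
    exact (IH.trans (pvRot_perm q)).cons i

def pvG (m : Nat) (j : Nat) : Nat := if j = m - 1 then 1 else j + 2

theorem pvRot_range (m : Nat) (hm : 1 ≤ m) :
    pvRot (List.map (· + 1) (List.range m)) = List.map (pvG m) (List.range m) := by
  obtain ⟨m', rfl⟩ : ∃ m', m = m' + 1 := ⟨m - 1, by omega⟩
  have h1 : List.map (· + 1) (List.range (m' + 1)) = 1 :: List.map (· + 2) (List.range m') := by
    rw [List.range_succ_eq_map, List.map_cons, List.map_map]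
    congr 1
  have h2 : List.map (pvG (m' + 1)) (List.range (m' + 1)) = List.map (· + 2) (List.range m') ++ [1] := by
    rw [List.range_succ, List.map_append]
    congr 1
    · exact List.map_congr_left (fun j hj => by
        simp only [List.mem_range] at hj
        simp [pvG]; omega)
    · simp [pvG]
  rw [h1, h2, pvRot]

theorem pvFoldl_length (ws : List (Nat × Int)) (res : List Int) :
    (ws.foldl (fun r ic => r.set ic.1 ic.2) res).length = res.length := by
  induction ws generalizing res with
  | nil => rfl
  | cons w ws IH => rw [List.foldl_cons, IH (res.set w.1 w.2), List.length_set]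

theorem pvFoldl_not_written (ws : List (Nat × Int)) (res : List Int) (k : Nat)
    (h : k ∉ ws.map Prod.fst) :
    (ws.foldl (fun r ic => r.set ic.1 ic.2) res)[k]? = res[k]? := by
  induction ws generalizing res with
  | nil => rfl
  | cons w ws IH =>
    simp only [List.map_cons, List.mem_cons, not_or] at h
    rw [List.foldl_cons, IH (res.set w.1 w.2) h.2, List.getElem?_set_ne (fun he => h.1 he.symm)]

theorem pvFoldl_written (ws : List (Nat × Int)) (res : List Int) (i : Nat) (v : Int)
    (hnd : (ws.map Prod.fst).Nodup) (hmem : (i, v) ∈ ws) (hi : i < res.length) :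
    (ws.foldl (fun r ic => r.set ic.1 ic.2) res)[i]? = some v := by
  induction ws generalizing res with
  | nil => simp at hmem
  | cons w ws IH =>
    simp only [List.map_cons, List.nodup_cons] at hnd
    rcases List.mem_cons.mp hmem with he | hm
    · subst he
      rw [List.foldl_cons, pvFoldl_not_written _ _ _ hnd.1]
      simp [hi]
    · rw [List.foldl_cons]
      exact IH _ hnd.2 hm (by simpa using hi)

theorem pvB_cons_aux (x : Int) (t : List Int) (hm : 1 ≤ t.length) :
    pvBLoop (x :: t) (List.range (t.length + 1)) (List.replicate (t.length + 1) 0)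
      = x :: pvRotR (pvBLoop t (List.range t.length) (List.replicate t.length 0)) := by
  set m := t.length with hmdef
  set P := pvP (List.range m) with hP
  set r := pvBLoop t (List.range m) (List.replicate m 0) with hr
  have hPperm : P.Perm (List.range m) := pvP_perm _
  have hPlen : P.length = m := by simpa using hPperm.length_eq
  have hPnd : P.Nodup := hPperm.nodup_iff.mpr List.nodup_range
  have hPmem : ∀ i, i ∈ P ↔ i < m := fun i => by rw [hPperm.mem_iff, List.mem_range]
  have hginj : ∀ a ∈ P, ∀ b ∈ P, pvG m a = pvG m b → a = b := by
    intro a ha b hb hab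
    have ha' : a < m := (hPmem a).1 ha
    have hb' : b < m := (hPmem b).1 hb
    unfold pvG at hab
    split_ifs at hab <;> omega
  have hgpos : ∀ j, 1 ≤ pvG m j := by intro j; unfold pvG; split_ifs <;> omega
  have hglt : ∀ j, j < m → pvG m j < m + 1 := by intro j hj; unfold pvG; split_ifs <;> omega
  have hrange : pvP (List.range (m + 1)) = 0 :: List.map (pvG m) P := by
    rw [List.range_succ_eq_map, pvP,
      show List.map Nat.succ (List.range m) = List.map (· + 1) (List.range m) from by simp,
      pvRot_range m hm, pvP_map]
  have hL : pvBLoop (x :: t) (List.range (m + 1)) (List.replicate (m + 1) 0)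
      = ((List.map (pvG m) P).zip t).foldl (fun r ic => r.set ic.1 ic.2)
          ((List.replicate (m + 1) 0).set 0 x) := by
    rw [pvBLoop_eq_foldl, hrange, List.zip_cons_cons, List.foldl_cons]
  have hR : r = (P.zip t).foldl (fun r ic => r.set ic.1 ic.2) (List.replicate m 0) :=
    pvBLoop_eq_foldl t (List.range m) (List.replicate m 0)
  have hrlen : r.length = m := by rw [hR, pvFoldl_length]; simp
  have hrne : r ≠ [] := by intro h; rw [h] at hrlen; simp at hrlen; omega
  obtain ⟨y0, r', hre⟩ : ∃ y0 r', r = y0 :: r' := by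
    cases hc : r with
    | nil => exact absurd hc hrne
    | cons a b => exact ⟨a, b, rfl⟩
  have hnd1 : (((List.map (pvG m) P).zip t).map Prod.fst).Nodup := by
    rw [List.map_fst_zip (by simp [hPlen, ← hmdef])]
    exact hPnd.map_on hginj
  have hnd2 : ((P.zip t).map Prod.fst).Nodup := by
    rw [List.map_fst_zip (by simp [hPlen, ← hmdef])]
    exact hPnd
  have hkey : ∀ i, i < m →
      (pvBLoop (x :: t) (List.range (m + 1)) (List.replicate (m + 1) 0))[pvG m i]? = r[i]? := by
    intro i hi
    obtain ⟨j, hj, hPj⟩ := List.getElem_of_mem ((hPmem i).2 hi)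
    have hjm : j < m := hPlen ▸ hj
    have hmemw : (pvG m i, t[j]) ∈ (List.map (pvG m) P).zip t := by
      have he : ((List.map (pvG m) P).zip t)[j]'(by simp [hPlen]; omega) = (pvG m i, t[j]) := by
        rw [List.getElem_zip]
        simp [hPj]
      exact he ▸ List.getElem_mem _
    have hmemw' : (i, t[j]) ∈ P.zip t := by
      have he : (P.zip t)[j]'(by simp [hPlen]; omega) = (i, t[j]) := by
        rw [List.getElem_zip]
        simp [hPj]
      exact he ▸ List.getElem_mem _
    rw [hL, pvFoldl_written _ _ _ _ hnd1 hmemw (by simp; have := hglt i hi; omega),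
        hR, pvFoldl_written _ _ _ _ hnd2 hmemw' (by simp [hi])]
  apply List.ext_getElem?
  intro k
  rcases Nat.lt_or_ge k (m + 1) with hk | hk
  · match k, hk with
    | 0, _ =>
      rw [hL, pvFoldl_not_written]
      · simp
      · rw [List.map_fst_zip (by simp [hPlen, ← hmdef])]
        intro hc
        obtain ⟨j, hj, hje⟩ := List.mem_map.mp hc
        have := hgpos j
        omega
    | (k' + 1), hk =>
      have hkm : k' + 1 ≤ m := by omega
      by_cases h1 : k' = 0
      · subst h1
        have h2 : pvG m (m - 1) = 1 := by unfold pvG; simp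
        have h3 := hkey (m - 1) (by omega)
        rw [h2] at h3
        rw [h3, hre]
        simp only [pvRotR, List.getElem?_cons_succ, List.getElem?_cons_zero]
        have hlen : (y0 :: r').length = m := by rw [← hre]; exact hrlen
        rw [← List.getLast?_eq_some_getLast, List.getLast?_eq_getElem?, hlen]
      · obtain ⟨k'', rfl⟩ : ∃ k'', k' = k'' + 1 := ⟨k' - 1, by omega⟩
        have h2 : pvG m (k'' + 1 - 1) = k'' + 1 + 1 := by unfold pvG; split_ifs <;> omega
        have h3 := hkey (k'' + 1 - 1) (by omega)
        rw [h2] at h3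
        rw [h3, hre]
        simp only [pvRotR, List.getElem?_cons_succ]
        rw [show k'' + 1 - 1 = k'' from rfl, ← hre]
        rw [List.getElem?_dropLast]
        have hk2 : k'' < r.length - 1 := by omega
        simp [hk2]
  · have hLlen : (pvBLoop (x :: t) (List.range (m + 1)) (List.replicate (m + 1) 0)).length
        = m + 1 := by rw [hL, pvFoldl_length]; simp
    have hRlen : (x :: pvRotR r).length = m + 1 := by
      rw [hre]
      simp only [pvRotR, List.length_cons, List.length_dropLast]
      have hlen : (y0 :: r').length = m := by rw [← hre]; exact hrlen
      simp at hlen ⊢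
      omega
    rw [List.getElem?_eq_none (by omega), List.getElem?_eq_none (by omega)]

theorem pvB_cons (x : Int) (t : List Int) :
    pvBLoop (x :: t) (List.range (t.length + 1)) (List.replicate (t.length + 1) 0)
      = x :: pvRotR (pvBLoop t (List.range t.length) (List.replicate t.length 0)) := by
  cases t with
  | nil => rfl
  | cons y t' => exact pvB_cons_aux x (y :: t') (by simp)

theorem pvB_eq_pvF (s : List Int) :
    pvBLoop s (List.range s.length) (List.replicate s.length 0) = pvF s := by
  induction s with
  | nil => rfl
  | cons x t IH =>
    rw [show (x :: t).length = t.length + 1 from rfl, pvB_cons, IH, pvF]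

-- ===== VERDICT (by name: the statement is the Claim_ definition above) =====
theorem deckRevealedIncreasing_spec : Claim_equal_deckRevealedIncreasing := by
  intro deck _ hpre
  have hlen : (PySem.List.sorted deck (fun x => x) false).length = deck.length :=
    PySem.List.length_sorted deck (fun x => x) false
  have hB : deckRevealedIncreasing_alt deck
      = pvF (PySem.List.sorted deck (fun x => x) false) := by
    unfold deckRevealedIncreasing_alt
    rw [← hlen]
    exact pvB_eq_pvF _
  have hA : deckRevealedIncreasing deck
      = pvF (PySem.List.sorted deck (fun x => x) false) := by
    unfold deckRevealedIncreasing
    cases hs : PySem.List.sorted deck (fun x => x) false with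
    | nil => exact absurd ((PySem.List.sorted_eq_nil_iff deck (fun x => x) false).mp hs) hpre
    | cons x ds =>
      show pvALoop (x :: ds).dropLast [(x :: ds).getLast (by simp)] = pvF (x :: ds)
      rw [pvALoop_eq_pvF, List.dropLast_append_getLast]
  unfold Spec_deckRevealedIncreasing
  rw [hA, hB]
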